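-- pv_equiv track=rewrite | github.com/krh5620/memoirekh | STF/code/STEP2_extractCandidats.py | var2lemme
-- ===== SOURCE A (Python) =====
-- import itertools
-- from itertools import permutations
--
-- def var2lemme(listeVars,dicoNF2LemmePOS,NFrecherche):
--   """
--   Input = ["PRON|PRON|VERB","PRON|VERB|VERB"... ]
--           dico {"avoir;il;y : {'avoir' : [AUX,VERB]}{'y' : PRON|ADV} {'il' : PRON}}
--   Output =  ["il|y|avoir","y|il|avoir"..]
--   """
--   #listeVars = ast.literal_eval(listeVars)
--   allLemmesCandidat = []
--   for NF in dicoNF2LemmePOS :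
--     if NF == NFrecherche :
--       POSelts = dicoNF2LemmePOS[NF]
--       # Combinaison possibles :
--       listeTuples = []
--       for lemme in POSelts :
--         POSpossibles = POSelts[lemme]
--         for POSpossible in POSpossibles :
--           listeTuples.append((lemme,POSpossible))
--       listeTuplesPermutations = list(itertools.permutations(listeTuples))
--       #Verif si combinaisons font partie des transfos déjà observées :
--       for listeTuples in listeTuplesPermutations :
--         ALL_listeTuplesSansDoublon = permutations(listeTuples,len(NF.split(";")))
--         #/!\ si 1 meme elt a plusieurs POS possibles => choix POSnorm + fréquent
--         for permut in list(ALL_listeTuplesSansDoublon) :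
--           POS_genere = ""
--           lemme_genere = ""
--           for elt in permut :
--             if POS_genere == "" :
--               POS_genere = elt[1]
--               lemme_genere = elt[0]
--             else :
--               POS_genere = POS_genere + "|" + elt[1]
--               lemme_genere = lemme_genere + "|" + elt[0]
--
--           if POS_genere in listeVars and NF == ";".join(sorted(lemme_genere.split("|"))) and lemme_genere not in allLemmesCandidat  :
--             allLemmesCandidat.append(lemme_genere)
--   return allLemmesCandidat
-- ===== SOURCE B (Python) =====
-- import itertools
--
-- def var2lemme(listeVars, dicoNF2LemmePOS, NFrecherche):
--     # Same result as A, but enumerates the k-permutations of the (lemme, POS) pairs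
--     # ONCE instead of re-enumerating them inside every full permutation of the pairs:
--     # the outer itertools.permutations(listeTuples) loop of A only replays the same
--     # k-permutations (as a set), so the first pass already produces every candidate.
--     allLemmesCandidat = []
--     k = len(NFrecherche.split(";"))
--     for NF, POSelts in dicoNF2LemmePOS.items():
--         if NF != NFrecherche:
--             continue
--         pairs = [(lemme, pos) for lemme, poss in POSelts.items() for pos in poss]
--         for permut in itertools.permutations(pairs, k):
--             POS_genere = ""
--             lemme_genere = ""
--             for lemme, pos in permut:
--                 if POS_genere == "":
--                     POS_genere = pos
--                     lemme_genere = lemme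
--                 else:
--                     POS_genere = POS_genere + "|" + pos
--                     lemme_genere = lemme_genere + "|" + lemme
--             if (POS_genere in listeVars
--                     and NFrecherche == ";".join(sorted(lemme_genere.split("|")))
--                     and lemme_genere not in allLemmesCandidat):
--                 allLemmesCandidat.append(lemme_genere)
--     return allLemmesCandidat
-- ===== Notes on version B (the rewrite author's own statement) =====
-- stated objective: alternative
-- what changed: B drops A's redundant outer loop over all n! full permutations of the (lemme,POS) pairs and enumerates the k-permutations once (the later full permutations only replay the same k-permutations, which the dedup check discards), looking at each matching dict entry directly.
import Mathlib
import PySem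

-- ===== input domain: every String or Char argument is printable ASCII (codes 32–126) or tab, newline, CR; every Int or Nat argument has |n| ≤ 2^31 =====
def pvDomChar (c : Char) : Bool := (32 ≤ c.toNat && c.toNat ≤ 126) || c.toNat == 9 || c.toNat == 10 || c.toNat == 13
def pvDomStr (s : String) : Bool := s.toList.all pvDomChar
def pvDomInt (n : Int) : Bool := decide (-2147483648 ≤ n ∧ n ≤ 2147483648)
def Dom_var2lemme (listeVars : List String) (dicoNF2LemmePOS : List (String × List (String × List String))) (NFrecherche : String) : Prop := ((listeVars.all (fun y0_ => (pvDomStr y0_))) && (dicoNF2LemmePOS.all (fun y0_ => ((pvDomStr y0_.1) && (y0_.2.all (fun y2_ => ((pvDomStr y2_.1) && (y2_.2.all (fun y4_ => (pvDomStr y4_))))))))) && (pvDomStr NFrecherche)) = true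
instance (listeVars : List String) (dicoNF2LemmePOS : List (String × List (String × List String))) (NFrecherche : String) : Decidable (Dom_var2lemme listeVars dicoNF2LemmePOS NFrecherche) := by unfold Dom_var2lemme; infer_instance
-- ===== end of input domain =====

-- B removes A's redundant outer loop over the full permutations of the (lemme,POS) pairs
-- and enumerates the k-permutations once; objective: alternative (same values, different algorithm).


-- ===== PORT A =====
-- Shared helper: the inner loop both Pythons contain verbatim — builds
-- (POS_genere, lemme_genere) from one permutation of (lemme, POS) pairs.
def pvConcatPermut (permut : List (String × String)) : String × String :=
  permut.foldl (fun st elt =>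
    if st.1 == "" then (elt.2, elt.1)
    else (st.1 ++ "|" ++ elt.2, st.2 ++ "|" ++ elt.1)) ("", "")

-- Shared helper: the candidate-filtering loop both Pythons contain verbatim:
-- for each permutation, build the strings and append lemme_genere if the POS string was
-- observed, the lemmas re-sort to NF, and it is not already collected.
-- `.split(";")` / `.split("|")`: the separators are nonempty literals, so
-- PySem.Str.split? is always `some`; `.getD []` is never the default.
def pvCollect (listeVars : List String) (NF : String) (acc : List String)
    (permuts : List (List (String × String))) : List String :=
  permuts.foldl (fun a permut =>
    let pg := pvConcatPermut permut
    if listeVars.contains pg.1 &&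
        ((NF == PySem.Str.join ";" (PySem.List.sorted ((PySem.Str.split? pg.2 "|").getD []) (fun x => x) false)) &&
         !(a.contains pg.2)) then a ++ [pg.2] else a) acc

-- Python A iterates the dict's keys and looks each key up (`POSelts = dicoNF2LemmePOS[NF]`,
-- `POSpossibles = POSelts[lemme]`); dict keys are unique, so that lookup is the entry's own value.
def var2lemme (listeVars : List String) (dicoNF2LemmePOS : List (String × List (String × List String))) (NFrecherche : String) : List String :=
  dicoNF2LemmePOS.foldl (fun allLemmesCandidat entry =>
    if entry.1 == NFrecherche then
      let listeTuples := entry.2.foldl (fun lt le =>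
        le.2.foldl (fun lt2 POSpossible => lt2 ++ [(le.1, POSpossible)]) lt) []
      (PySem.List.permutations listeTuples listeTuples.length).foldl
        (fun acc σ =>
          pvCollect listeVars entry.1 acc
            (PySem.List.permutations σ ((PySem.Str.split? entry.1 ";").getD []).length))
        allLemmesCandidat
    else allLemmesCandidat) []

-- ===== PORT B =====
def var2lemme_alt (listeVars : List String) (dicoNF2LemmePOS : List (String × List (String × List String))) (NFrecherche : String) : List String :=
  let k := ((PySem.Str.split? NFrecherche ";").getD []).length
  dicoNF2LemmePOS.foldl (fun allLemmesCandidat entry =>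
    if !(entry.1 == NFrecherche) then allLemmesCandidat
    else
      let pairs := entry.2.flatMap (fun le => le.2.map (fun pos => (le.1, pos)))
      pvCollect listeVars NFrecherche allLemmesCandidat (PySem.List.permutations pairs k)) []

-- ===== PRECONDITION & SPEC =====
def Spec_var2lemme (listeVars : List String) (dicoNF2LemmePOS : List (String × List (String × List String))) (NFrecherche : String) (out : List String) : Prop := out = var2lemme_alt listeVars dicoNF2LemmePOS NFrecherche
instance (listeVars : List String) (dicoNF2LemmePOS : List (String × List (String × List String))) (NFrecherche : String) (out : List String) : Decidable (Spec_var2lemme listeVars dicoNF2LemmePOS NFrecherche out) := by unfold Spec_var2lemme; infer_instance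

-- ===== CLAIM (what is proved, stated in full; the proofs are below) =====
def Claim_equal_var2lemme : Prop := ∀ (listeVars : List String) (dicoNF2LemmePOS : List (String × List (String × List String))) (NFrecherche : String), Dom_var2lemme listeVars dicoNF2LemmePOS NFrecherche → Spec_var2lemme listeVars dicoNF2LemmePOS NFrecherche (var2lemme listeVars dicoNF2LemmePOS NFrecherche)

-- ===== LEMMAS AND PROOFS =====

-- The filtering step of pvCollect, named so the proofs can speak about one step.
def pvStep (listeVars : List String) (NF : String) (a : List String)
    (permut : List (String × String)) : List String :=
  let pg := pvConcatPermut permut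
  if listeVars.contains pg.1 &&
      ((NF == PySem.Str.join ";" (PySem.List.sorted ((PySem.Str.split? pg.2 "|").getD []) (fun x => x) false)) &&
       !(a.contains pg.2)) then a ++ [pg.2] else a

-- The two Boolean filters of pvStep, named.
def pvC1 (listeVars : List String) (permut : List (String × String)) : Bool :=
  listeVars.contains (pvConcatPermut permut).1

def pvC2 (NF : String) (permut : List (String × String)) : Bool :=
  NF == PySem.Str.join ";" (PySem.List.sorted ((PySem.Str.split? (pvConcatPermut permut).2 "|").getD []) (fun x => x) false)

lemma pvCollect_eq_foldl (lv : List String) (nf : String) (a : List String)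
    (ps : List (List (String × String))) :
    pvCollect lv nf a ps = ps.foldl (pvStep lv nf) a := rfl

lemma pvStep_eq (lv : List String) (nf : String) (a : List String) (t : List (String × String)) :
    pvStep lv nf a t =
      if pvC1 lv t && (pvC2 nf t && !(a.contains (pvConcatPermut t).2))
      then a ++ [(pvConcatPermut t).2] else a := rfl

lemma pvStep_mem (lv : List String) (nf : String) (a : List String) (t : List (String × String))
    (x : String) (hx : x ∈ a) : x ∈ pvStep lv nf a t := by
  rw [pvStep_eq]
  split
  · exact List.mem_append_left _ hx
  · exact hx

lemma foldl_pvStep_mono (lv : List String) (nf : String) :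
    ∀ (ps : List (List (String × String))) (a : List String) (x : String), x ∈ a →
      x ∈ ps.foldl (pvStep lv nf) a := by
  intro ps
  induction ps with
  | nil => intro a x hx; simpa using hx
  | cons q qs ih =>
    intro a x hx
    rw [List.foldl_cons]
    exact ih _ x (pvStep_mem lv nf a q x hx)

lemma foldl_pvStep_complete (lv : List String) (nf : String) :
    ∀ (ps : List (List (String × String))) (a : List String) (t : List (String × String)),
      t ∈ ps → pvC1 lv t = true → pvC2 nf t = true →
      (pvConcatPermut t).2 ∈ ps.foldl (pvStep lv nf) a := by
  intro ps
  induction ps with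
  | nil => intro a t ht; simp at ht
  | cons q qs ih =>
    intro a t ht h1 h2
    rw [List.foldl_cons]
    rcases List.mem_cons.mp ht with rfl | ht'
    · apply foldl_pvStep_mono
      rw [pvStep_eq]
      by_cases hc : a.contains (pvConcatPermut t).2
      · have : (pvConcatPermut t).2 ∈ a := by simpa using hc
        split
        · exact List.mem_append_left _ this
        · exact this
      · simp only [h1, h2, hc, Bool.not_false, Bool.and_self, if_pos]
        exact List.mem_append_right _ (List.mem_singleton.mpr rfl)
    · exact ih _ t ht' h1 h2

lemma foldl_pvStep_absorb (lv : List String) (nf : String) :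
    ∀ (ys : List (List (String × String))) (a : List String),
      (∀ t ∈ ys, pvC1 lv t = true → pvC2 nf t = true → (pvConcatPermut t).2 ∈ a) →
      ys.foldl (pvStep lv nf) a = a := by
  intro ys
  induction ys with
  | nil => intro a _; rfl
  | cons q qs ih =>
    intro a h
    have hq : pvStep lv nf a q = a := by
      rw [pvStep_eq]
      by_cases h1 : pvC1 lv q = true
      · by_cases h2 : pvC2 nf q = true
        · have hm : (pvConcatPermut q).2 ∈ a := h q List.mem_cons_self h1 h2
          have hc : a.contains (pvConcatPermut q).2 = true := by simpa using hm
          simp [h1, h2, hm]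
        · simp [Bool.eq_false_iff.mpr h2]
      · simp [Bool.eq_false_iff.mpr h1]
    rw [List.foldl_cons, hq]
    exact ih a (fun t ht => h t (List.mem_cons_of_mem q ht))

lemma subperm_of_mem_perms {α : Type} {xs p : List α} {r : Nat}
    (h : p ∈ PySem.List.permutations xs r) : p.Subperm xs := by
  obtain ⟨-, rest, hp⟩ := PySem.List.exists_perm_of_mem_permutations r xs p h
  exact ((List.sublist_append_left p rest).subperm).trans hp.subperm

lemma perms_succ {α : Type} (xs : List α) (r : Nat) :
    PySem.List.permutations xs (r + 1) =
      (List.range xs.length).flatMap (fun i =>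
        match xs[i]? with
        | none => []
        | some x => (PySem.List.permutations (xs.eraseIdx i) r).map (fun p => x :: p)) := by
  rw [PySem.List.permutations]
  rfl

lemma mem_perms_of_subperm {α : Type} :
    ∀ (r : Nat) (xs t : List α), t.length = r → t.Subperm xs →
      t ∈ PySem.List.permutations xs r
  | 0, xs, t => by
    intro hlen _
    rw [PySem.List.permutations_zero, List.length_eq_zero_iff.mp hlen]
    exact List.mem_singleton.mpr rfl
  | (r + 1), xs, t => by
    intro hlen hsub
    cases t with
    | nil => simp at hlen
    | cons x t' =>
      have hx : x ∈ xs := hsub.subset List.mem_cons_self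
      obtain ⟨i, hi, hxi⟩ := List.getElem_of_mem hx
      have hperm : xs.Perm (xs[i] :: xs.eraseIdx i) :=
        List.Perm.symm (List.getElem_cons_eraseIdx_perm hi)
      rw [hxi] at hperm
      have hsub' : t'.Subperm (xs.eraseIdx i) := by
        have h2 : (x :: t').Subperm (x :: xs.eraseIdx i) := hsub.trans hperm.subperm
        exact (List.subperm_cons x).mp h2
      have ht' : t' ∈ PySem.List.permutations (xs.eraseIdx i) r :=
        mem_perms_of_subperm r _ t' (by simpa using hlen) hsub'
      rw [perms_succ]
      refine List.mem_flatMap.mpr ⟨i, List.mem_range.mpr hi, ?_⟩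
      have hg : xs[i]? = some x := by rw [List.getElem?_eq_getElem hi, hxi]
      rw [hg]
      exact List.mem_map.mpr ⟨t', ht', rfl⟩

lemma perms_self_cons {α : Type} :
    ∀ (l : List α), ∃ rest, PySem.List.permutations l l.length = l :: rest
  | [] => ⟨[], by rw [List.length_nil, PySem.List.permutations_zero]⟩
  | (x :: xs) => by
    obtain ⟨r, hr⟩ := perms_self_cons xs
    have h : PySem.List.permutations (x :: xs) (x :: xs).length =
        (x :: xs) :: (r.map (fun p => x :: p) ++
          (((List.range xs.length).map Nat.succ).flatMap (fun i =>
            match (x :: xs)[i]? with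
            | none => []
            | some y =>
                (PySem.List.permutations ((x :: xs).eraseIdx i) xs.length).map
                  (fun p => y :: p)))) := by
      rw [show (x :: xs).length = xs.length + 1 from rfl, perms_succ,
        show List.range (x :: xs).length = 0 :: List.map Nat.succ (List.range xs.length) from
          by rw [List.length_cons, List.range_succ_eq_map],
        List.flatMap_cons]
      simp only [List.getElem?_cons_zero, List.eraseIdx_cons_zero, hr, List.map_cons,
        List.cons_append]
    exact ⟨_, h⟩

-- A's per-entry computation: the pass over the FIRST full permutation (the identity) already
-- collects everything; every later pass only replays k-permutations already seen.
lemma entry_eq (lv : List String) (nf : String) (k : Nat) (L : List (String × String))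
    (acc : List String) :
    (PySem.List.permutations L L.length).foldl
        (fun acc σ => pvCollect lv nf acc (PySem.List.permutations σ k)) acc
      = pvCollect lv nf acc (PySem.List.permutations L k) := by
  obtain ⟨rest, hL⟩ := perms_self_cons L
  simp only [pvCollect_eq_foldl]
  rw [← List.foldl_flatMap, hL, List.flatMap_cons, List.foldl_append]
  apply foldl_pvStep_absorb
  intro t ht h1 h2
  obtain ⟨σ, hσ, htσ⟩ := List.mem_flatMap.mp ht
  have hσm : σ ∈ PySem.List.permutations L L.length := by
    rw [hL]; exact List.mem_cons_of_mem _ hσ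
  have h3 : t ∈ PySem.List.permutations L k :=
    mem_perms_of_subperm k L t (PySem.List.length_of_mem_permutations htσ)
      ((subperm_of_mem_perms htσ).trans (subperm_of_mem_perms hσm))
  exact foldl_pvStep_complete lv nf _ acc t h3 h1 h2

-- ===== VERDICT (by name: the statement is the Claim_ definition above) =====
theorem var2lemme_spec : Claim_equal_var2lemme := by
  intro lv dico nf _
  unfold Spec_var2lemme var2lemme var2lemme_alt
  simp only []
  apply List.foldl_ext
  intro acc entry _
  by_cases h : entry.1 == nf
  · have heq : entry.1 = nf := by simpa using h
    rw [if_pos h, if_neg (by simp [h])]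
    simp only [PySem.List.foldl_append_singleton_eq_map]
    rw [PySem.List.foldl_append_eq_flatMap, List.nil_append, heq]
    exact entry_eq lv nf _ _ acc
  · rw [if_neg h, if_pos (by simpa using h)]
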